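-- pv_equiv track=rewrite | github.com/relax-www/Extract_Feature | utils/filter.py | ShakeOff
-- ===== SOURCE A (Python) =====
-- def ShakeOff(inputs, N):
--     usenum = inputs[0]  # 有效值
--     i = 0  # 标记计数器
--     for index, tmp in enumerate(inputs):
--         if tmp != usenum:
--             i = i + 1
--             if i >= N:
--                 i = 0
--                 inputs[index] = usenum
--     return inputs
-- ===== SOURCE B (Python) =====
-- def ShakeOff(inputs, N):
--     usenum = inputs[0]
--     mismatches = [index for index, value in enumerate(inputs) if value != usenum]
--     if N <= 1:
--         targets = mismatches
--     else:
--         targets = [index for rank, index in enumerate(mismatches, 1) if rank % N == 0]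
--     for index in targets:
--         inputs[index] = usenum
--     return inputs
-- ===== Notes on version B (the rewrite author's own statement) =====
-- stated objective: alternative
-- what changed: A's single stateful loop with a counter that resets on every N-th mismatch is replaced by a two-pass decomposition: collect the indices of all mismatching elements, filter them down to every N-th by rank (all of them when N <= 1), then write usenum back at exactly those indices.
import Mathlib
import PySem

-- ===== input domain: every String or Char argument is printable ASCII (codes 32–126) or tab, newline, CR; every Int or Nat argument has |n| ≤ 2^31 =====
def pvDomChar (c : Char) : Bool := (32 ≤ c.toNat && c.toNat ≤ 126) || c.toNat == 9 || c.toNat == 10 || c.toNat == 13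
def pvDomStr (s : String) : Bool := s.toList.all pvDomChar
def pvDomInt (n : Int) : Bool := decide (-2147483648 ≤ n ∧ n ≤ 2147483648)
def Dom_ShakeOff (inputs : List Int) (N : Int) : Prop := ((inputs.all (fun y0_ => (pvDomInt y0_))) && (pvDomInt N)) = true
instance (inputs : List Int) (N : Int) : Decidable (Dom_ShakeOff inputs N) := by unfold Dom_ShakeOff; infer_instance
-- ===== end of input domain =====

-- B replaces A's single counting loop by a two-pass decomposition (collect mismatch
-- indices, then keep every N-th by a rank filter and write them back); objective:
-- alternative decomposition, same cost. Both Pythons mutate `inputs` in place; the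
-- equivalence proved here is about the RETURN value.

-- ===== PORT A =====
-- the for-loop of A: state = (counter i, the list being mutated); index walks along
def shakeLoopA (usenum N : Int) (i : Int) (index : Nat) (rest : List Int) (acc : List Int) : List Int :=
  match rest with
  | [] => acc
  | tmp :: rest' =>
    if tmp ≠ usenum then
      if i + 1 ≥ N then shakeLoopA usenum N 0 (index + 1) rest' (acc.set index usenum)
      else shakeLoopA usenum N (i + 1) (index + 1) rest' acc
    else shakeLoopA usenum N i (index + 1) rest' acc

def ShakeOff (inputs : List Int) (N : Int) : List Int :=
  match PySem.List.pyGet? inputs 0 with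
  | none => []                                   -- inputs[0] raises IndexError: excluded by Pre_
  | some usenum => shakeLoopA usenum N 0 0 inputs inputs

-- ===== PORT B =====
def ShakeOff_alt (inputs : List Int) (N : Int) : List Int :=
  match PySem.List.pyGet? inputs 0 with
  | none => []                                   -- inputs[0] raises IndexError: excluded by Pre_
  | some usenum =>
    let mismatches := ((PySem.List.enumerate inputs 0).filter (fun p => p.2 != usenum)).map (·.1)
    let targets := if N ≤ 1 then mismatches
      else ((PySem.List.enumerate mismatches 1).filter (fun p => p.1 % N == 0)).map (·.2)
    targets.foldl (fun a j => a.set j.toNat usenum) inputs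

-- ===== PRECONDITION & SPEC =====
-- Pre_ excludes only the empty list, on which A (and B alike) raises IndexError at inputs[0].
def Pre_ShakeOff (inputs : List Int) (N : Int) : Prop := inputs ≠ []
instance (inputs : List Int) (N : Int) : Decidable (Pre_ShakeOff inputs N) := by unfold Pre_ShakeOff; infer_instance
def pvWitness_ShakeOff : List Int × Int := ([1, 2, 2, 3, 1, 2], 2)

def Spec_ShakeOff (inputs : List Int) (N : Int) (out : List Int) : Prop := out = ShakeOff_alt inputs N
instance (inputs : List Int) (N : Int) (out : List Int) : Decidable (Spec_ShakeOff inputs N out) := by unfold Spec_ShakeOff; infer_instance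

-- ===== CLAIM (what is proved, stated in full; the proofs are below) =====
def Claim_equal_ShakeOff : Prop := ∀ (inputs : List Int) (N : Int), Dom_ShakeOff inputs N → Pre_ShakeOff inputs N → Spec_ShakeOff inputs N (ShakeOff inputs N)

-- ===== LEMMAS AND PROOFS =====

-- effective period: N when N ≥ 2, otherwise 1 (A replaces every mismatch when N ≤ 1)
def normN (N : Int) : Nat := if N ≤ 1 then 1 else N.toNat

-- indices (from `index` on) of the elements of the list that differ from u
def misIdx (u : Int) (index : Nat) : List Int → List Nat
  | [] => []
  | x :: xs => if x ≠ u then index :: misIdx u (index + 1) xs else misIdx u (index + 1) xs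

-- keep every n-th element, counter c mismatches already seen since the last kept one
def pickrank (n : Nat) (c : Nat) : List Nat → List Nat
  | [] => []
  | x :: xs => if c + 1 ≥ n then x :: pickrank n 0 xs else pickrank n (c + 1) xs

-- A's loop expressed as: which indices get overwritten
def selIdx (u : Int) (n : Nat) (c : Nat) (index : Nat) : List Int → List Nat
  | [] => []
  | x :: xs =>
    if x ≠ u then
      if c + 1 ≥ n then index :: selIdx u n 0 (index + 1) xs
      else selIdx u n (c + 1) (index + 1) xs
    else selIdx u n c (index + 1) xs

lemma loopA_eq (u N : Int) :
    ∀ (rest : List Int) (c index : Nat) (acc : List Int), c < normN N →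
      shakeLoopA u N (c : Int) index rest acc
        = (selIdx u (normN N) c index rest).foldl (fun a j => a.set j u) acc := by
  intro rest
  induction rest with
  | nil => intro c index acc _; simp [shakeLoopA, selIdx]
  | cons x xs ih =>
    intro c index acc hc
    by_cases hx : x ≠ u
    · have hiff : ((c : Int) + 1 ≥ N) ↔ (c + 1 ≥ normN N) := by
        unfold normN at *
        split_ifs at * <;> omega
      by_cases hrep : c + 1 ≥ normN N
      · have h1 : (c : Int) + 1 ≥ N := hiff.mpr hrep
        simp only [shakeLoopA, selIdx, if_pos hx, if_pos h1, if_pos hrep, List.foldl_cons]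
        have h0 : (0 : Int) = ((0 : Nat) : Int) := rfl
        rw [h0, ih 0 (index + 1) (acc.set index u) (by unfold normN at *; split_ifs at * <;> omega)]
      · have h1 : ¬ ((c : Int) + 1 ≥ N) := fun h => hrep (hiff.mp h)
        simp only [shakeLoopA, selIdx, if_pos hx, if_neg h1, if_neg hrep]
        have h0 : (c : Int) + 1 = ((c + 1 : Nat) : Int) := by push_cast; ring
        rw [h0, ih (c + 1) (index + 1) acc (by unfold normN at *; split_ifs at * <;> omega)]
    · simp only [shakeLoopA, selIdx, if_neg hx]
      exact ih c (index + 1) acc hc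

lemma selIdx_eq (u : Int) (n : Nat) :
    ∀ (rest : List Int) (c index : Nat),
      selIdx u n c index rest = pickrank n c (misIdx u index rest) := by
  intro rest
  induction rest with
  | nil => intro c index; simp [selIdx, misIdx, pickrank]
  | cons x xs ih =>
    intro c index
    by_cases hx : x ≠ u
    · by_cases hrep : c + 1 ≥ n
      · simp only [selIdx, misIdx, pickrank, if_pos hx, if_pos hrep]
        rw [ih]
      · simp only [selIdx, misIdx, pickrank, if_pos hx, if_neg hrep]
        rw [ih]
    · simp only [selIdx, misIdx, if_neg hx]
      exact ih c (index + 1)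

lemma pickrank_one (c : Nat) : ∀ (xs : List Nat), pickrank 1 c xs = xs := by
  intro xs
  induction xs generalizing c with
  | nil => simp [pickrank]
  | cons x xs ih => simp [pickrank, ih]

lemma mis_eq (u : Int) :
    ∀ (rest : List Int) (s : Nat),
      ((PySem.List.enumerate rest (s : Int)).filter (fun p => p.2 != u)).map (·.1)
        = (misIdx u s rest).map Int.ofNat := by
  intro rest
  induction rest with
  | nil => intro s; simp [PySem.List.enumerate_nil, misIdx]
  | cons x xs ih =>
    intro s
    have hs1 : (s : Int) + 1 = ((s + 1 : Nat) : Int) := by push_cast; ring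
    simp only [PySem.List.enumerate_cons, List.filter_cons, misIdx]
    by_cases hx : x ≠ u
    · have hb : (((s : Int), x).2 != u) = true := by simpa using hx
      simp only [hb, if_true, if_pos hx, List.map_cons]
      rw [hs1, ih]
      simp
    · have hb : (((s : Int), x).2 != u) = false := by
        simp [show x = u from not_not.mp hx]
      simp only [hb, Bool.false_eq_true, if_false, if_neg hx]
      rw [hs1, ih]

lemma rankfilter (N : Int) (hN : 2 ≤ N) :
    ∀ (ys : List Nat) (s c : Nat), 1 ≤ s → c < N.toNat → s % N.toNat = (c + 1) % N.toNat →
      ((PySem.List.enumerate (ys.map Int.ofNat) (s : Int)).filter (fun p => p.1 % N == 0)).map (·.2)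
        = (pickrank N.toNat c ys).map Int.ofNat := by
  intro ys
  induction ys with
  | nil => intro s c _ _ _; simp [PySem.List.enumerate_nil, pickrank]
  | cons y ys ih =>
    intro s c hs hc hmod
    have hNn : (N.toNat : Int) = N := Int.toNat_of_nonneg (by omega)
    have h2 : 2 ≤ N.toNat := by omega
    have h1n : 1 % N.toNat = 1 := Nat.mod_eq_of_lt (by omega)
    have hcast : (s : Int) % N = ((s % N.toNat : Nat) : Int) := by
      rw [← hNn]; exact (Int.natCast_mod s N.toNat).symm
    have hsucc : (s : Int) + 1 = ((s + 1 : Nat) : Int) := by push_cast; ring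
    simp only [List.map_cons, PySem.List.enumerate_cons, List.filter_cons, pickrank]
    by_cases hz : s % N.toNat = 0
    · have hcond : (((s : Int), Int.ofNat y).1 % N == 0) = true := by
        show ((s : Int) % N == 0) = true
        rw [hcast, hz]; rfl
      have hrep : c + 1 ≥ N.toNat := by
        by_contra h
        have hcm : (c + 1) % N.toNat = c + 1 := Nat.mod_eq_of_lt (by omega)
        omega
      have hnext : (s + 1) % N.toNat = (0 + 1) % N.toNat := by
        rw [Nat.add_mod, hz, h1n]; simp [h1n]
      simp only [hcond, if_true, if_pos hrep, List.map_cons]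
      rw [hsucc, ih (s + 1) 0 (by omega) (by omega) hnext]
    · have hsz : ((s % N.toNat : Nat) : Int) ≠ 0 := by exact_mod_cast hz
      have hcond : (((s : Int), Int.ofNat y).1 % N == 0) = false := by
        show ((s : Int) % N == 0) = false
        rw [hcast]; exact beq_eq_false_iff_ne.mpr hsz
      have hlt : c + 1 < N.toNat := by
        by_contra h
        have hceq : c + 1 = N.toNat := by omega
        rw [hceq, Nat.mod_self] at hmod
        exact hz hmod
      have hsn : s % N.toNat = c + 1 := by rw [hmod]; exact Nat.mod_eq_of_lt hlt
      have hrep : ¬ (c + 1 ≥ N.toNat) := by omega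
      have hnext : (s + 1) % N.toNat = (c + 1 + 1) % N.toNat := by
        rw [Nat.add_mod s 1, Nat.add_mod (c + 1) 1, hsn, Nat.mod_eq_of_lt hlt, h1n]
      simp only [hcond, Bool.false_eq_true, if_false, if_neg hrep]
      rw [hsucc, ih (s + 1) (c + 1) (by omega) (by omega) hnext]

lemma foldl_set_map (u : Int) (acc : List Int) (l : List Nat) :
    (l.map Int.ofNat).foldl (fun a j => a.set j.toNat u) acc
      = l.foldl (fun a j => a.set j u) acc := by
  rw [List.foldl_map]
  simp

-- ===== VERDICT (by name: the statement is the Claim_ definition above) =====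
theorem ShakeOff_spec : Claim_equal_ShakeOff := by
  intro inputs N _ hpre
  unfold Spec_ShakeOff
  cases inputs with
  | nil => exact absurd rfl hpre
  | cons u rest =>
    have hget : PySem.List.pyGet? (u :: rest) 0 = some u := by
      simp [PySem.List.pyGet?, PySem.List.pyIdx?]
    unfold ShakeOff ShakeOff_alt
    rw [hget]
    simp only
    have hA : shakeLoopA u N 0 0 (u :: rest) (u :: rest)
        = (pickrank (normN N) 0 (misIdx u 0 (u :: rest))).foldl (fun a j => a.set j u) (u :: rest) := by
      have := loopA_eq u N (u :: rest) 0 0 (u :: rest) (by unfold normN; split_ifs <;> omega)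
      simp only [Nat.cast_zero] at this
      rw [this, selIdx_eq]
    have hmis : ((PySem.List.enumerate (u :: rest) 0).filter (fun p => p.2 != u)).map (·.1)
        = (misIdx u 0 (u :: rest)).map Int.ofNat := by
      have := mis_eq u (u :: rest) 0
      simpa using this
    by_cases hN : N ≤ 1
    · rw [if_pos hN]
      have hn : normN N = 1 := by unfold normN; rw [if_pos hN]
      rw [hA, hn, pickrank_one, hmis, foldl_set_map]
    · rw [if_neg hN]
      have hn : normN N = N.toNat := by unfold normN; rw [if_neg hN]
      have hrf := rankfilter N (by omega) (misIdx u 0 (u :: rest)) 1 0 (by omega)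
        (by omega) (by simp [Nat.mod_eq_of_lt (show (1:Nat) < N.toNat by omega)])
      simp only [Nat.cast_one] at hrf
      rw [hA, hn, hmis, hrf, foldl_set_map]
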